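-- pv_equiv track=rewrite | github.com/pingfangx/pythonx | ToolsX/tool/file/translatorx/process_rfc_line_break_for_translation.py | ends_with_article
-- ===== SOURCE A (Python) =====
-- def ends_with_article(line: str) -> bool:
--     """是否以冠词(或介词)结尾，如果上一行以冠词结尾，说明下一行的大写开头应该是专有名词，如
--     The
--     TCP ....
--     """
--     article_list = [
--         'the',
--         'a',
--         'an',
--         'in',
--         'of',
--         'and',
--     ]
--     line = line.rstrip().lower()
--     for article in article_list:
--         if line.endswith(' ' + article.lower()):
--             return True
--     return False
-- ===== SOURCE B (Python) =====
-- def ends_with_article(line: str) -> bool: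
--     # scan backwards: skip trailing whitespace, then locate the start of the last word
--     i = len(line)
--     while i > 0 and line[i - 1].isspace():
--         i -= 1
--     j = i
--     while j > 0 and line[j - 1] != ' ':
--         j -= 1
--     # j > 0 means a space immediately precedes the last word
--     return j > 0 and line[j:i].lower() in ('the', 'a', 'an', 'in', 'of', 'and')
-- ===== Notes on version B (the rewrite author's own statement) =====
-- stated objective: alternative
-- what changed: B scans the line backwards once (skip trailing whitespace, collect the last word up to a space) and compares that single lowered word against the six articles, instead of A's rstrip+lower of the whole line followed by six endswith scans.
import Mathlib
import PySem

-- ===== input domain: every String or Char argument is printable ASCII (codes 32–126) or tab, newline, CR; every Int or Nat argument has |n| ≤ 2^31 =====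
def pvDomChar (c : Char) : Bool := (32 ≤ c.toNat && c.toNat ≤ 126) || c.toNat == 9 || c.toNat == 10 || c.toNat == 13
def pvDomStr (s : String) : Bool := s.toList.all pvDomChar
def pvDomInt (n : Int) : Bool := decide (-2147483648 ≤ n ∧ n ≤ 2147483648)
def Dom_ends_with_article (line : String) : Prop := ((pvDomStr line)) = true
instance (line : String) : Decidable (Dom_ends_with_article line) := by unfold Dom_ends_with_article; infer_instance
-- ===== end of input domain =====

-- B scans the line backwards once: skip trailing whitespace, collect the last word up to a
-- space, and compare that single lowered word against the six articles — replacing A's loop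
-- of six whole-line endswith scans over the rstripped, lowered line (alternative decomposition).

-- ===== PORT A =====
def ends_with_article (line : String) : Bool :=
  let s := PySem.Chars.lower (PySem.Chars.rstrip line.toList)
  -- for article in article_list: if line.endswith(' ' + article.lower()): return True
  [['t','h','e'], ['a'], ['a','n'], ['i','n'], ['o','f'], ['a','n','d']].any
    (fun art => PySem.Chars.endswith s (' ' :: PySem.Chars.lower art))

-- ===== PORT B =====
-- first backward loop of B: skip trailing whitespace (on the reversed character list)
def bSkipWs : List Char → List Char
  | [] => []
  | c :: r => if PySem.Chars.isspace c then bSkipWs r else c :: r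

-- second backward loop of B: collect chars of the last word until a space (or the start)
def bGrabWord : List Char → List Char × List Char
  | [] => ([], [])
  | c :: r =>
      if c = ' ' then ([], c :: r)
      else
        let p := bGrabWord r
        (c :: p.1, p.2)

def ends_with_article_alt (line : String) : Bool :=
  let p := bGrabWord (bSkipWs line.toList.reverse)
  match p.2 with
  | [] => false           -- no space precedes the last word (j == 0)
  | _ :: _ =>
      let w := PySem.Chars.lower p.1.reverse
      w == ['t','h','e'] || w == ['a'] || w == ['a','n'] ||
        w == ['i','n'] || w == ['o','f'] || w == ['a','n','d']

-- ===== PRECONDITION & SPEC =====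
def Spec_ends_with_article (line : String) (out : Bool) : Prop := out = ends_with_article_alt line
instance (line : String) (out : Bool) : Decidable (Spec_ends_with_article line out) := by unfold Spec_ends_with_article; infer_instance

-- ===== CLAIM (what is proved, stated in full; the proofs are below) =====
def Claim_equal_ends_with_article : Prop := ∀ (line : String), Dom_ends_with_article line → Spec_ends_with_article line (ends_with_article line)

-- ===== LEMMAS AND PROOFS =====

lemma bSkipWs_eq (l : List Char) : bSkipWs l = l.dropWhile PySem.Chars.isspace := by
  induction l with
  | nil => rfl
  | cons c r ih =>
    by_cases h : PySem.Chars.isspace c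
    · simp [bSkipWs, List.dropWhile, h, ih]
    · simp [bSkipWs, List.dropWhile, h]

lemma bGrabWord_eq (l : List Char) :
    bGrabWord l = (l.takeWhile (fun c => c != ' '), l.dropWhile (fun c => c != ' ')) := by
  induction l with
  | nil => rfl
  | cons c r ih =>
    by_cases h : c = ' '
    · simp [bGrabWord, h]
    · have h' : (c != ' ') = true := by simp [h]
      simp [bGrabWord, h, h', ih]

lemma lowerChar_space (c : Char) : (PySem.Chars.lowerChar c != ' ') = (c != ' ') := by
  unfold PySem.Chars.lowerChar PySem.Chars.isupper
  split
  · next h =>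
    simp only [Bool.and_eq_true, decide_eq_true_eq] at h
    have h1 : 65 ≤ c.toNat := h.1
    have h2 : c.toNat ≤ 90 := h.2
    have hv : (c.toNat + 32).isValidChar := by
      left; change c.toNat + 32 < 0xd800; omega
    have ht : (Char.ofNat (c.toNat + 32)).toNat = c.toNat + 32 := by
      rw [Char.toNat_ofNat, if_pos hv]
    have hne : (Char.ofNat (c.toNat + 32) != ' ') = true := by
      simp only [bne_iff_ne, ne_eq]
      intro he
      have h3 := congrArg Char.toNat he
      rw [ht] at h3
      have : (' ' : Char).toNat = 32 := rfl
      omega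
    have hcne : (c != ' ') = true := by
      simp only [bne_iff_ne, ne_eq]
      intro he; subst he
      have : (' ' : Char).toNat = 32 := rfl
      omega
    rw [hne, hcne]
  · rfl

-- takeWhile/dropWhile (≠ ' ') commute with charwise lowering
lemma takeWhile_lower (l : List Char) :
    (PySem.Chars.lower l).takeWhile (fun c => c != ' ')
      = PySem.Chars.lower (l.takeWhile (fun c => c != ' ')) := by
  induction l with
  | nil => rfl
  | cons c r ih =>
    simp only [PySem.Chars.lower, List.map, List.takeWhile]
    rw [lowerChar_space]
    by_cases h : (c != ' ') = true <;> simp [h] <;>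
      simpa [PySem.Chars.lower] using ih

lemma length_dropWhile_pos_iff (p : Char → Bool) (l : List Char) :
    (l.takeWhile p).length < l.length ↔ l.dropWhile p ≠ [] := by
  have h3 := congrArg List.length (List.takeWhile_append_dropWhile (p := p) (l := l))
  simp only [List.length_append] at h3
  constructor
  · intro hlt hnil; rw [hnil] at h3; simp at h3; omega
  · intro hne
    have := List.length_pos_iff.mpr hne
    omega

-- chars after the last space: w ++ [' '] is a prefix of r iff the leading non-space run of r is exactly w and a space follows
lemma prefix_space_iff (w r : List Char) (hv : ∀ c ∈ w, c ≠ ' ') :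
    (w ++ [' '] <+: r) ↔ (r.takeWhile (fun c => c != ' ') = w ∧ r.dropWhile (fun c => c != ' ') ≠ []) := by
  constructor
  · rintro ⟨rest, hrest⟩
    subst hrest
    have htw : (w ++ ' ' :: rest).takeWhile (fun c => c != ' ') = w := by
      induction w with
      | nil => simp
      | cons a t ih =>
        have ha : a ≠ ' ' := hv a (by simp)
        simp [ha, ih (fun c hc => hv c (by simp [hc]))]
    rw [List.append_assoc, List.singleton_append]
    refine ⟨htw, ?_⟩
    rw [← length_dropWhile_pos_iff, htw]
    simp
  · rintro ⟨htw, hlen⟩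
    have hsplit := (List.takeWhile_append_dropWhile (p := fun c => c != ' ') (l := r)).symm
    set d := r.dropWhile (fun c => c != ' ') with hd
    obtain ⟨c, d', hdh⟩ := List.exists_cons_of_ne_nil hlen
    have hc : ¬ (c != ' ') = true := by
      have := List.head_dropWhile_not (p := fun c => c != ' ') (l := r)
      rw [← hd, hdh] at this
      simpa using this (by simp)
    have hc' : c = ' ' := by simpa using hc
    refine ⟨d', ?_⟩
    rw [hsplit, htw, hdh, hc']
    simp

-- ===== VERDICT (by name: the statement is the Claim_ definition above) =====
set_option maxRecDepth 8000 in
theorem ends_with_article_spec : Claim_equal_ends_with_article := by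
  intro line _
  unfold Spec_ends_with_article ends_with_article ends_with_article_alt
  rw [bSkipWs_eq, bGrabWord_eq]
  set S := line.toList.reverse.dropWhile PySem.Chars.isspace with hS
  have hrs : PySem.Chars.rstrip line.toList = S.reverse := by
    simp [PySem.Chars.rstrip, hS]
  have hlowrev : PySem.Chars.lower S.reverse = (PySem.Chars.lower S).reverse := by
    simp [PySem.Chars.lower]
  have key : ∀ w : List Char, (∀ c ∈ w, c ≠ ' ') →
      PySem.Chars.endswith (PySem.Chars.lower (PySem.Chars.rstrip line.toList)) (' ' :: w)
        = ((S.dropWhile (fun c => c != ' ') ≠ []  : Bool)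
            && ((PySem.Chars.lower (S.takeWhile (fun c => c != ' '))).reverse == w)) := by
    intro w hw
    have hwrev : ∀ c ∈ w.reverse, c ≠ ' ' := by simpa using hw
    rw [hrs, hlowrev, Bool.eq_iff_iff, PySem.Chars.endswith_iff, ← List.reverse_prefix]
    rw [show (' ' :: w).reverse = w.reverse ++ [' '] from by simp, List.reverse_reverse]
    rw [prefix_space_iff w.reverse (PySem.Chars.lower S) hwrev, takeWhile_lower]
    have hdrp : ((PySem.Chars.lower S).dropWhile (fun c => c != ' ') ≠ [])
        ↔ (S.dropWhile (fun c => c != ' ') ≠ []) := by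
      rw [← length_dropWhile_pos_iff, ← length_dropWhile_pos_iff, takeWhile_lower]
      simp [PySem.Chars.lower]
    rw [hdrp]
    simp only [Bool.and_eq_true, decide_eq_true_eq, beq_iff_eq, List.reverse_eq_iff]
    exact and_comm
  simp only [List.any_cons, List.any_nil,
    show PySem.Chars.lower ['t','h','e'] = ['t','h','e'] from by decide,
    show PySem.Chars.lower ['a'] = ['a'] from by decide,
    show PySem.Chars.lower ['a','n'] = ['a','n'] from by decide,
    show PySem.Chars.lower ['i','n'] = ['i','n'] from by decide,
    show PySem.Chars.lower ['o','f'] = ['o','f'] from by decide,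
    show PySem.Chars.lower ['a','n','d'] = ['a','n','d'] from by decide,
    key ['t','h','e'] (by simp), key ['a'] (by simp), key ['a','n'] (by simp),
    key ['i','n'] (by simp), key ['o','f'] (by simp), key ['a','n','d'] (by simp)]
  have hlw : PySem.Chars.lower (S.takeWhile (fun c => c != ' ')).reverse
      = (PySem.Chars.lower (S.takeWhile (fun c => c != ' '))).reverse := by
    simp [PySem.Chars.lower]
  rcases hD : S.dropWhile (fun c => c != ' ') with _ | ⟨c, d⟩
  · simp
  · simp [hlw, Bool.or_assoc]
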